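-- pv_equiv track=rewrite | github.com/enria/Beefalo | plugins/workflow/actions/arrange_pdf_lines.py | remove_redundancy_enter
-- ===== SOURCE A (Python) =====
-- def remove_redundancy_enter(text):
--     lines = text.split("\n")
--     new_lines = []
--     for line in lines:
--         if line.endswith("-"):
--             new_lines.append(line[:-1])
--         else:
--             new_lines.append(line+" ")
--     return "".join(new_lines)
-- ===== SOURCE B (Python) =====
-- def remove_redundancy_enter(text):
--     return (text + "\n").replace("-\n", "").replace("\n", " ")
-- ===== Notes on version B (the rewrite author's own statement) =====
-- stated objective: idiomatic
-- what changed: Replaces the split/classify/join loop over lines with two whole-string substitutions: append a newline, delete every "-\n", then turn every remaining "\n" into a space.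
import Mathlib
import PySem

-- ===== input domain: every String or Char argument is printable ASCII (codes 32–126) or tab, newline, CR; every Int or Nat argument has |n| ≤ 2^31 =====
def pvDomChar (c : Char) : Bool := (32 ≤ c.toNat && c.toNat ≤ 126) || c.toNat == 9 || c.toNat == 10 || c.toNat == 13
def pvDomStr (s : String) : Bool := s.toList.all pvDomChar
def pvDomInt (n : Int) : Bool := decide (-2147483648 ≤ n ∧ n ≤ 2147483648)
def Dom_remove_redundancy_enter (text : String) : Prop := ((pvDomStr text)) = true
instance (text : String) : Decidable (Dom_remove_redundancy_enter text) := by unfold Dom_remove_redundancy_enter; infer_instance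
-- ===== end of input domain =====

-- B replaces A's per-line loop (split on "\n", classify each line, join) with two
-- whole-string substitutions on text+"\n" (objective: idiomatic, same cost).

-- ===== PORT A =====
def remove_redundancy_enter (text : String) : String :=
  let lines := (PySem.Str.split? text "\n").getD []
  let new_lines := lines.foldl (fun acc line =>
      if PySem.Str.endswith line "-" then acc ++ [PySem.Str.slice line none (some (-1))]
      else acc ++ [line ++ " "]) ([] : List String)
  PySem.Str.join "" new_lines

-- ===== PORT B =====
def remove_redundancy_enter_alt (text : String) : String :=
  PySem.Str.replace (PySem.Str.replace (text ++ "\n") "-\n" "") "\n" " "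

-- ===== PRECONDITION & SPEC =====
def Spec_remove_redundancy_enter (text : String) (out : String) : Prop := out = remove_redundancy_enter_alt text
instance (text : String) (out : String) : Decidable (Spec_remove_redundancy_enter text out) := by unfold Spec_remove_redundancy_enter; infer_instance

-- ===== CLAIM (what is proved, stated in full; the proofs are below) =====
def Claim_equal_remove_redundancy_enter : Prop := ∀ (text : String), Dom_remove_redundancy_enter text → Spec_remove_redundancy_enter text (remove_redundancy_enter text)

-- ===== LEMMAS AND PROOFS =====


def sub (c : Char) : Char := if c = '\n' then ' ' else c

def gSpec : List Char → List Char
  | [] => [' ']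
  | [c] => if c = '-' then [] else [sub c, ' ']
  | c :: d :: rest => if c = '-' ∧ d = '\n' then gSpec rest else sub c :: gSpec (d :: rest)

def rep1 : List Char → List Char
  | [] => []
  | [c] => [c]
  | c :: d :: rest => if c = '-' ∧ d = '\n' then rep1 rest else c :: rep1 (d :: rest)

def splitNl : List Char → List (List Char)
  | [] => [[]]
  | c :: rest =>
    if c = '\n' then [] :: splitNl rest
    else match splitNl rest with
      | [] => [[c]]
      | l :: ls => (c :: l) :: ls

def fLine (l : List Char) : List Char :=
  if PySem.Chars.endswith l ['-'] then l.dropLast else l ++ [' ']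


lemma endswith_eq_decide (s p : List Char) :
    PySem.Chars.endswith s p = decide (p <:+ s) := by
  rw [Bool.eq_iff_iff]
  simp [PySem.Chars.endswith_iff]

lemma fLine_nil : fLine [] = [' '] := by
  simp [fLine, endswith_eq_decide]

lemma fLine_single (c : Char) : fLine [c] = if c = '-' then [] else [c, ' '] := by
  simp only [fLine, endswith_eq_decide, List.suffix_cons_iff, List.suffix_nil]
  by_cases h : c = '-' <;> simp [h, eq_comm]

lemma fLine_cons (c : Char) (d : Char) (t : List Char) :
    fLine (c :: d :: t) = c :: fLine (d :: t) := by
  have he : PySem.Chars.endswith (c :: d :: t) ['-'] = PySem.Chars.endswith (d :: t) ['-'] := by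
    simp only [endswith_eq_decide, List.suffix_cons_iff]
    simp
  simp only [fLine, he]
  split_ifs with h
  · simp [List.dropLast]
  · simp

lemma go_rep1 : ∀ (fuel : Nat) (s acc : List Char), s.length ≤ fuel →
    PySem.Chars.replace.go ['-', '\n'] [] fuel s acc = acc.reverse ++ rep1 s := by
  intro fuel
  induction fuel with
  | zero =>
    intro s acc h
    have : s = [] := List.eq_nil_of_length_eq_zero (Nat.le_zero.mp h)
    subst this
    simp [PySem.Chars.replace.go, rep1]
  | succ n ih =>
    intro s acc h
    rcases s with _ | ⟨c, t⟩
    · simp [PySem.Chars.replace.go, rep1]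
    rcases t with _ | ⟨d, t⟩
    · rw [PySem.Chars.replace.go]
      have hp : List.isPrefixOf ['-', '\n'] [c] = false := by
        simp [List.isPrefixOf]
      rw [hp]
      simp only [Bool.false_eq_true, if_false]
      rw [ih [] (c :: acc) (by simp)]
      simp [rep1]
    · rw [PySem.Chars.replace.go]
      have hp : List.isPrefixOf ['-', '\n'] (c :: d :: t) = (c == '-' && d == '\n') := by
        simp [List.isPrefixOf, Bool.and_comm, BEq.comm]
      rw [hp, rep1]
      by_cases hcd : c = '-' ∧ d = '\n'
      · obtain ⟨rfl, rfl⟩ := hcd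
        simp only [beq_self_eq_true, Bool.and_self, if_true, List.drop, List.reverse_nil,
          List.nil_append, and_self, if_pos trivial]
        exact ih t acc (by simp at h; omega)
      · have : (c == '-' && d == '\n') = false := by
          rcases not_and_or.mp hcd with h' | h' <;> simp [h']
        rw [this]
        simp only [Bool.false_eq_true, if_false, if_neg hcd]
        rw [ih (d :: t) (c :: acc) (by simp at h ⊢; omega)]
        simp

lemma go_rep2 : ∀ (fuel : Nat) (s acc : List Char), s.length ≤ fuel →
    PySem.Chars.replace.go ['\n'] [' '] fuel s acc = acc.reverse ++ s.map sub := by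
  intro fuel
  induction fuel with
  | zero =>
    intro s acc h
    have : s = [] := List.eq_nil_of_length_eq_zero (Nat.le_zero.mp h)
    subst this
    simp [PySem.Chars.replace.go]
  | succ n ih =>
    intro s acc h
    rcases s with _ | ⟨c, t⟩
    · simp [PySem.Chars.replace.go]
    rw [PySem.Chars.replace.go]
    have hp : List.isPrefixOf ['\n'] (c :: t) = (c == '\n') := by
      simp [List.isPrefixOf, BEq.comm]
    rw [hp]
    by_cases hc : c = '\n'
    · subst hc
      simp only [beq_self_eq_true, if_true]
      show PySem.Chars.replace.go ['\n'] [' '] n t (' ' :: acc) = acc.reverse ++ List.map sub ('\n' :: t)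
      rw [ih t (' ' :: acc) (by simpa using h)]
      simp [sub]
    · have : (c == '\n') = false := by simp [hc]
      rw [this]
      simp only [Bool.false_eq_true, if_false]
      rw [ih t (c :: acc) (by simpa using h)]
      simp [sub, hc]

lemma chars_replace_rep1 (s : List Char) :
    PySem.Chars.replace s ['-', '\n'] [] = rep1 s := by
  rw [PySem.Chars.replace]
  simp only [List.isEmpty_cons, Bool.false_eq_true, if_false]
  exact go_rep1 s.length s [] (le_refl _)

lemma chars_replace_rep2 (s : List Char) :
    PySem.Chars.replace s ['\n'] [' '] = s.map sub := by
  rw [PySem.Chars.replace]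
  simp only [List.isEmpty_cons, Bool.false_eq_true, if_false]
  exact go_rep2 s.length s [] (le_refl _)

lemma b_chars (cs : List Char) : (rep1 (cs ++ ['\n'])).map sub = gSpec cs := by
  induction cs using gSpec.induct with
  | case1 => simp [rep1, gSpec, sub]
  | case2 => simp [rep1, gSpec]
  | case3 c hc => simp [rep1, gSpec, sub, hc]
  | case4 c d rest hcd ih =>
    obtain ⟨rfl, rfl⟩ := hcd
    simp only [List.cons_append, rep1, gSpec, and_self, if_pos trivial]
    exact ih
  | case5 c d rest hcd ih =>
    simp only [List.cons_append, rep1, if_neg hcd, gSpec]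
    simp only [List.map_cons]
    simp only [List.cons_append] at ih
    rw [ih]


lemma splitNl_ne_nil (cs : List Char) : splitNl cs ≠ [] := by
  induction cs using splitNl.induct with
  | case1 => simp [splitNl]
  | case2 rest ih => simp [splitNl]
  | case3 c rest hc hsp ih => exact absurd hsp ih
  | case4 c rest hc l ls hsp ih => simp [splitNl, hc, hsp]

lemma go_split : ∀ (fuel : Nat) (s cur : List Char) (accl : List (List Char)),
    s.length ≤ fuel →
    PySem.Chars.splitOn.go ['\n'] fuel s cur accl =
      accl.reverse ++ (match splitNl s with
        | [] => [cur.reverse]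
        | l :: ls => (cur.reverse ++ l) :: ls) := by
  intro fuel
  induction fuel with
  | zero =>
    intro s cur accl h
    have : s = [] := List.eq_nil_of_length_eq_zero (Nat.le_zero.mp h)
    subst this
    simp [PySem.Chars.splitOn.go, splitNl]
  | succ n ih =>
    intro s cur accl h
    rcases s with _ | ⟨c, t⟩
    · simp [PySem.Chars.splitOn.go, splitNl]
    rw [PySem.Chars.splitOn.go]
    have hp : List.isPrefixOf ['\n'] (c :: t) = (c == '\n') := by
      simp [List.isPrefixOf, BEq.comm]
    rw [hp]
    by_cases hc : c = '\n'
    · subst hc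
      simp only [beq_self_eq_true, if_true]
      show PySem.Chars.splitOn.go ['\n'] n t [] (cur.reverse :: accl) = _
      rw [ih t [] (cur.reverse :: accl) (by simpa using h)]
      have hne := splitNl_ne_nil t
      rcases hsp : splitNl t with _ | ⟨l, ls⟩
      · exact absurd hsp hne
      · simp [splitNl, hsp]
    · have hb : (c == '\n') = false := by simp [hc]
      rw [hb]
      simp only [Bool.false_eq_true, if_false]
      rw [ih t (c :: cur) accl (by simpa using h)]
      have hne := splitNl_ne_nil t
      rcases hsp : splitNl t with _ | ⟨l, ls⟩
      · exact absurd hsp hne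
      · simp [splitNl, hc, hsp]

lemma chars_splitOn_eq (cs : List Char) : PySem.Chars.splitOn cs ['\n'] = splitNl cs := by
  rw [PySem.Chars.splitOn]
  rw [go_split (cs.length + 1) cs [] [] (by omega)]
  have hne := splitNl_ne_nil cs
  rcases hsp : splitNl cs with _ | ⟨l, ls⟩
  · exact absurd hsp hne
  · simp

lemma gSpec_newline (rest : List Char) : gSpec ('\n' :: rest) = ' ' :: gSpec rest := by
  rcases rest with _ | ⟨d, r⟩
  · simp [gSpec, sub]
  · rw [gSpec]
    simp [sub]

lemma splitNl_newline (rest : List Char) : splitNl ('\n' :: rest) = [] :: splitNl rest := by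
  simp [splitNl]


lemma a_chars (cs : List Char) : ((splitNl cs).map fLine).flatten = gSpec cs := by
  induction cs using gSpec.induct with
  | case1 => simp [splitNl, fLine_nil, gSpec]
  | case2 =>
    simp [splitNl, fLine_single, gSpec]
  | case3 c hc =>
    by_cases hn : c = '\n'
    · subst hn
      simp [splitNl, fLine_nil, gSpec, sub]
    · simp [splitNl, hn, fLine_single, hc, gSpec, sub]
  | case4 c d rest hcd ih =>
    obtain ⟨rfl, rfl⟩ := hcd
    have h1 : splitNl ('-' :: '\n' :: rest) = ['-'] :: splitNl rest := by
      simp [splitNl]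
    rw [h1, gSpec]
    simp only [and_self, if_pos trivial]
    simp only [List.map_cons, List.flatten_cons, fLine_single]
    simpa using ih
  | case5 c d rest hcd ih =>
    rw [show gSpec (c :: d :: rest) = sub c :: gSpec (d :: rest) by rw [gSpec]; simp [hcd]]
    by_cases hc : c = '\n'
    · subst hc
      rw [splitNl_newline]
      simp only [List.map_cons, List.flatten_cons, fLine_nil, ih]
      simp [sub]
    · have hsubc : sub c = c := by simp [sub, hc]
      by_cases hd : d = '\n'
      · subst hd
        have hcm : c ≠ '-' := fun h => hcd ⟨h, rfl⟩
        have h1 : splitNl (c :: '\n' :: rest) = [c] :: splitNl rest := by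
          simp [splitNl, hc]
        rw [h1]
        rw [splitNl_newline] at ih
        simp only [List.map_cons, List.flatten_cons, fLine_nil] at ih
        have hrest : (List.map fLine (splitNl rest)).flatten = gSpec rest := by
          rw [gSpec_newline] at ih
          simpa using ih
        simp only [List.map_cons, List.flatten_cons, fLine_single, if_neg hcm, hrest,
          gSpec_newline, hsubc]
        rfl
      · obtain ⟨l0, ls0, hsp⟩ : ∃ l0 ls0, splitNl rest = l0 :: ls0 := by
          rcases h : splitNl rest with _ | ⟨l0, ls0⟩
          · exact absurd h (splitNl_ne_nil rest)
          · exact ⟨l0, ls0, rfl⟩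
        have h2 : splitNl (d :: rest) = (d :: l0) :: ls0 := by
          simp [splitNl, hd, hsp]
        have h1 : splitNl (c :: d :: rest) = (c :: d :: l0) :: ls0 := by
          rw [splitNl, if_neg hc, h2]
        rw [h1]
        rw [h2] at ih
        simp only [List.map_cons, List.flatten_cons] at ih ⊢
        rw [fLine_cons, List.cons_append, hsubc, ih]



lemma foldl_lines (l : List String) (a : List String) :
    l.foldl (fun acc line =>
      if PySem.Str.endswith line "-" then acc ++ [PySem.Str.slice line none (some (-1))]
      else acc ++ [line ++ " "]) a
    = a ++ l.map (fun line =>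
        if PySem.Str.endswith line "-" then PySem.Str.slice line none (some (-1))
        else line ++ " ") := by
  induction l generalizing a with
  | nil => simp
  | cons x xs ih =>
    simp only [List.foldl_cons, List.map_cons]
    split_ifs with h <;> rw [ih] <;> simp

lemma line_toList (line : List Char) :
    (if PySem.Str.endswith (String.ofList line) "-" then
        PySem.Str.slice (String.ofList line) none (some (-1))
      else String.ofList line ++ " ").toList = fLine line := by
  have he : PySem.Str.endswith (String.ofList line) "-" = PySem.Chars.endswith line ['-'] := by
    rw [PySem.Str.endswith_eq, String.toList_ofList]
    rfl
  rw [fLine, he]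
  split_ifs with h
  · rw [PySem.Str.slice_to_neg_one, String.toList_ofList]
  · rw [String.toList_append, String.toList_ofList]
    rfl

lemma intercalate_nil_eq_flatten (ls : List (List Char)) :
    ([] : List Char).intercalate ls = ls.flatten := by
  simp only [List.intercalate]
  induction ls with
  | nil => simp
  | cons x xs ih =>
    cases xs with
    | nil => simp
    | cons y ys => simpa [List.intersperse] using ih

-- ===== VERDICT (by name: the statement is the Claim_ definition above) =====
theorem remove_redundancy_enter_spec : Claim_equal_remove_redundancy_enter := by
  intro text _
  show remove_redundancy_enter text = remove_redundancy_enter_alt text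
  have hA : (remove_redundancy_enter text).toList = gSpec text.toList := by
    rw [show remove_redundancy_enter text = PySem.Str.join ""
        (((PySem.Str.split? text "\n").getD []).foldl (fun acc line =>
          if PySem.Str.endswith line "-" then acc ++ [PySem.Str.slice line none (some (-1))]
          else acc ++ [line ++ " "]) ([] : List String)) from rfl]
    have hsplit : (PySem.Str.split? text "\n").getD [] =
        (splitNl text.toList).map String.ofList := by
      rw [PySem.Str.split?]
      have h0 : PySem.Chars.split? text.toList ("\n" : String).toList =
          some (splitNl text.toList) := by
        rw [PySem.Chars.split?]
        rw [show ("\n" : String).toList = ['\n'] from rfl]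
        simp [chars_splitOn_eq]
      rw [h0]
      rfl
    rw [hsplit, foldl_lines, List.nil_append, PySem.Str.toList_join]
    have hmaps : (((splitNl text.toList).map String.ofList).map (fun line =>
        if PySem.Str.endswith line "-" then PySem.Str.slice line none (some (-1))
        else line ++ " ")).map String.toList = (splitNl text.toList).map fLine := by
      simp only [List.map_map]
      apply List.map_congr_left
      intro l _
      exact line_toList l
    rw [hmaps]
    rw [show ("" : String).toList = [] from rfl, PySem.Chars.join, intercalate_nil_eq_flatten]
    exact a_chars text.toList
  have hB : (remove_redundancy_enter_alt text).toList = gSpec text.toList := by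
    rw [remove_redundancy_enter_alt]
    rw [PySem.Str.toList_replace, PySem.Str.toList_replace]
    rw [String.toList_append]
    rw [show ("\n" : String).toList = ['\n'] from rfl,
        show ("-\n" : String).toList = ['-', '\n'] from rfl,
        show ("" : String).toList = [] from rfl,
        show (" " : String).toList = [' '] from rfl]
    rw [chars_replace_rep1, chars_replace_rep2]
    exact b_chars text.toList
  calc remove_redundancy_enter text
      = String.ofList (remove_redundancy_enter text).toList := (String.ofList_toList).symm
    _ = String.ofList (remove_redundancy_enter_alt text).toList := by rw [hA, hB]
    _ = remove_redundancy_enter_alt text := String.ofList_toList
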